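-- pv_equiv track=rewrite | github.com/Soufiane-Fartit/AutoLinkedin | src/scraping/utils.py | classifyJob
-- ===== SOURCE A (Python) =====
-- def classifyJob(title_):
--     keyword_dict = {
--         "Data Scientist": {'positive':["data", "scientist"], 'negative':[]},
--         "Data Analyst": {'positive':["data", "analyst", "analyste", "données"], 'negative':[]},
--         "Data Engineer": {'positive':["ingénieur", "engineer", "data", "données"], 'negative':[]},
--         "Ingénieur en Machine Learning": {'positive':["machine", "learning", "engineer", "ingénieur"], 'negative':[]},
--         "Python Developer" : {'positive':["python", "developer", "developpeur "], 'negative':[]},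
--     }
--     jobs_list = keyword_dict.keys()
--     pos_scores = [len([word for word in title_.split(" ") if word in keyword_dict[job_title]['positive']]) for job_title in keyword_dict.keys()]
--     neg_scores = [len([word for word in title_.split(" ") if word in keyword_dict[job_title]['negative']]) for job_title in keyword_dict.keys()]
--     tot_scores = [pos-neg for pos, neg in zip(pos_scores, neg_scores)]
--
--     maxi = max(tot_scores)
--     max_idx = [i for i, j in enumerate(tot_scores) if j == maxi]
--
--     return list(jobs_list)[max_idx[0]]
-- ===== SOURCE B (Python) =====
-- def classifyJob(title_):
--     categories = ["Data Scientist", "Data Analyst", "Data Engineer",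
--                   "Ing\u00e9nieur en Machine Learning", "Python Developer"]
--     positives = [["data", "scientist"],
--                  ["data", "analyst", "analyste", "donn\u00e9es"],
--                  ["ing\u00e9nieur", "engineer", "data", "donn\u00e9es"],
--                  ["machine", "learning", "engineer", "ing\u00e9nieur"],
--                  ["python", "developer", "developpeur "]]
--     # inverted index: keyword -> list of category indices containing it
--     index = {}
--     for i, kws in enumerate(positives):
--         for kw in kws:
--             index.setdefault(kw, []).append(i)
--     scores = [0] * len(categories)
--     for word in title_.split(" "):
--         for i in index.get(word, ()):
--             scores[i] += 1
--     best = max(scores)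
--     for i, s in enumerate(scores):
--         if s == best:
--             return categories[i]
-- ===== Notes on version B (the rewrite author's own statement) =====
-- stated objective: alternative
-- what changed: Replaces A's five per-category scans of the split word list (plus the always-empty negative scans, zip and enumerate-filter) by one inverted keyword-to-category-indices index built once from the fixed keyword table, a single counting pass over the words, and a first-argmax scan over the score list.
import Mathlib
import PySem

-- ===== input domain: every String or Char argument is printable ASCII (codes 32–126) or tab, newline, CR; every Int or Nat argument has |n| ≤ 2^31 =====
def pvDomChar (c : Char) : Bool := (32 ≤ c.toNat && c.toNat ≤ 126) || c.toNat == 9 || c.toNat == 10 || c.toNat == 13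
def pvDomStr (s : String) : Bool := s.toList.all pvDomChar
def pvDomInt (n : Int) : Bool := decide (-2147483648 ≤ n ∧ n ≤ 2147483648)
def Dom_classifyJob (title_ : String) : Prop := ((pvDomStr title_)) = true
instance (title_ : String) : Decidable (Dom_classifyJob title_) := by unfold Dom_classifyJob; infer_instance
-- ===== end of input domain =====

-- B replaces A's five per-category scans of the word list by one inverted keyword→categories
-- index and a single counting pass over the words (objective: alternative decomposition).

-- ===== PORT A =====
def classifyJob (title_ : String) : String :=
  let keyword_dict : PySem.Dict String (PySem.Dict String (List String)) :=
    PySem.Dict.ofList [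
      ("Data Scientist", PySem.Dict.ofList [("positive", ["data","scientist"]), ("negative", [])]),
      ("Data Analyst", PySem.Dict.ofList [("positive", ["data","analyst","analyste","données"]), ("negative", [])]),
      ("Data Engineer", PySem.Dict.ofList [("positive", ["ingénieur","engineer","data","données"]), ("negative", [])]),
      ("Ingénieur en Machine Learning", PySem.Dict.ofList [("positive", ["machine","learning","engineer","ingénieur"]), ("negative", [])]),
      ("Python Developer", PySem.Dict.ofList [("positive", ["python","developer","developpeur "]), ("negative", [])])]
  let jobs_list := keyword_dict.keys
  -- title_.split(" "): the separator is the nonempty literal " ", so split? never returns none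
  let words := (PySem.Str.split? title_ " ").getD []
  let pos_scores : List Int := keyword_dict.keys.map (fun job_title =>
    PySem.List.len (words.filter (fun word =>
      ((keyword_dict.getD job_title PySem.Dict.empty).getD "positive" []).contains word)))
  let neg_scores : List Int := keyword_dict.keys.map (fun job_title =>
    PySem.List.len (words.filter (fun word =>
      ((keyword_dict.getD job_title PySem.Dict.empty).getD "negative" []).contains word)))
  let tot_scores := (pos_scores.zip neg_scores).map (fun pn => pn.1 - pn.2)
  -- max(tot_scores): the list always has five elements, so max() cannot raise
  let maxi := (PySem.List.max? tot_scores (fun x => x)).getD 0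
  let max_idx := ((PySem.List.enumerate tot_scores).filter (fun ij => ij.2 == maxi)).map (·.1)
  -- max_idx[0] is safe: the maximum occurs in the list
  PySem.List.pyGetD jobs_list (PySem.List.pyGetD max_idx 0 0) ""

-- ===== PORT B =====
def pvCategories : List String :=
  ["Data Scientist", "Data Analyst", "Data Engineer",
   "Ingénieur en Machine Learning", "Python Developer"]

def pvPositives : List (List String) :=
  [["data","scientist"],
   ["data","analyst","analyste","données"],
   ["ingénieur","engineer","data","données"],
   ["machine","learning","engineer","ingénieur"],
   ["python","developer","developpeur "]]

def classifyJob_alt (title_ : String) : String :=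
  -- index.setdefault(kw, []).append(i)  =  d[kw] = d.get(kw, []) + [i]
  let index : PySem.Dict String (List Int) :=
    (PySem.List.enumerate pvPositives).foldl (fun d p =>
      p.2.foldl (fun d kw => d.modify kw [] (· ++ [p.1])) d) PySem.Dict.empty
  -- scores[i] += 1 for every category index i of each word (stored indices are nonnegative)
  let scores : List Int :=
    ((PySem.Str.split? title_ " ").getD []).foldl (fun sc word =>
      (index.getD word []).foldl (fun sc (i : Int) => sc.modify i.toNat (· + 1)) sc)
      (List.replicate pvCategories.length 0)
  let best := (PySem.List.max? scores (fun x => x)).getD 0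
  match (PySem.List.enumerate scores).find? (fun p => p.2 == best) with
  | some p => PySem.List.pyGetD pvCategories p.1 ""
  | none => ""   -- unreachable: the maximum is an element of scores

-- ===== PRECONDITION & SPEC =====
def Spec_classifyJob (title_ : String) (out : String) : Prop := out = classifyJob_alt title_
instance (title_ : String) (out : String) : Decidable (Spec_classifyJob title_ out) := by unfold Spec_classifyJob; infer_instance

-- ===== CLAIM (what is proved, stated in full; the proofs are below) =====
def Claim_equal_classifyJob : Prop := ∀ (title_ : String), Dom_classifyJob title_ → Spec_classifyJob title_ (classifyJob title_)

-- ===== LEMMAS AND PROOFS =====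

-- number of words of ws lying in pos (as Int): the score both programs assign a category
def pvCnt (pos ws : List String) : Int := ((ws.filter (fun w => pos.contains w)).length : Int)

-- A's selection tail on the five totals
def pvSelA (ns : List Int) : String :=
  let maxi := (PySem.List.max? ns (fun x => x)).getD 0
  let max_idx := ((PySem.List.enumerate ns).filter (fun ij => ij.2 == maxi)).map (·.1)
  PySem.List.pyGetD pvCategories (PySem.List.pyGetD max_idx 0 0) ""

-- B's selection tail on the five scores
def pvSelB (ns : List Int) : String :=
  let best := (PySem.List.max? ns (fun x => x)).getD 0
  match (PySem.List.enumerate ns).find? (fun p => p.2 == best) with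
  | some p => PySem.List.pyGetD pvCategories p.1 ""
  | none => ""

lemma pvCnt_nil (ws : List String) : pvCnt [] ws = 0 := by simp [pvCnt]

lemma pvCnt_cons (pos : List String) (w : String) (ws : List String) :
    pvCnt pos (w :: ws) = (if pos.contains w then 1 else 0) + pvCnt pos ws := by
  simp only [pvCnt, List.filter_cons]
  split_ifs <;> push_cast [List.length_cons] <;> ring

-- A evaluated: the dict machinery reduced away, leaving the five counts (negative lists empty)
lemma pvA_eval (t : String) :
    classifyJob t =
      pvSelA [pvCnt ["data","scientist"] ((PySem.Str.split? t " ").getD []) - pvCnt [] ((PySem.Str.split? t " ").getD []),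
              pvCnt ["data","analyst","analyste","données"] ((PySem.Str.split? t " ").getD []) - pvCnt [] ((PySem.Str.split? t " ").getD []),
              pvCnt ["ingénieur","engineer","data","données"] ((PySem.Str.split? t " ").getD []) - pvCnt [] ((PySem.Str.split? t " ").getD []),
              pvCnt ["machine","learning","engineer","ingénieur"] ((PySem.Str.split? t " ").getD []) - pvCnt [] ((PySem.Str.split? t " ").getD []),
              pvCnt ["python","developer","developpeur "] ((PySem.Str.split? t " ").getD []) - pvCnt [] ((PySem.Str.split? t " ").getD [])] := by
  rfl

-- one word's update of the five running scores, for every possible word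
lemma pvStep (w : String) (a b c d e : Int) :
    ((PySem.Dict.mk [("data",[0,1,2]),("scientist",[0]),("analyst",[1]),("analyste",[1]),
                   ("données",[1,2]),("ingénieur",[2,3]),("engineer",[2,3]),("machine",[3]),
                   ("learning",[3]),("python",[4]),("developer",[4]),("developpeur ",[4])] :
      PySem.Dict String (List Int)).getD w []).foldl
        (fun sc (i : Int) => sc.modify i.toNat (· + 1)) [a,b,c,d,e] =
    [a + (if (["data","scientist"] : List String).contains w then 1 else 0),
     b + (if (["data","analyst","analyste","données"] : List String).contains w then 1 else 0),
     c + (if (["ingénieur","engineer","data","données"] : List String).contains w then 1 else 0),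
     d + (if (["machine","learning","engineer","ingénieur"] : List String).contains w then 1 else 0),
     e + (if (["python","developer","developpeur "] : List String).contains w then 1 else 0)] := by
  by_cases h1 : w = "data"
  · subst h1; exact .trans (show _ = [a+1,b+1,c+1,d,e] from rfl) (by simp)
  by_cases h2 : w = "scientist"
  · subst h2; exact .trans (show _ = [a+1,b,c,d,e] from rfl) (by simp)
  by_cases h3 : w = "analyst"
  · subst h3; exact .trans (show _ = [a,b+1,c,d,e] from rfl) (by simp)
  by_cases h4 : w = "analyste"
  · subst h4; exact .trans (show _ = [a,b+1,c,d,e] from rfl) (by simp)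
  by_cases h5 : w = "données"
  · subst h5; exact .trans (show _ = [a,b+1,c+1,d,e] from rfl) (by simp)
  by_cases h6 : w = "ingénieur"
  · subst h6; exact .trans (show _ = [a,b,c+1,d+1,e] from rfl) (by simp)
  by_cases h7 : w = "engineer"
  · subst h7; exact .trans (show _ = [a,b,c+1,d+1,e] from rfl) (by simp)
  by_cases h8 : w = "machine"
  · subst h8; exact .trans (show _ = [a,b,c,d+1,e] from rfl) (by simp)
  by_cases h9 : w = "learning"
  · subst h9; exact .trans (show _ = [a,b,c,d+1,e] from rfl) (by simp)
  by_cases h10 : w = "python"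
  · subst h10; exact .trans (show _ = [a,b,c,d,e+1] from rfl) (by simp)
  by_cases h11 : w = "developer"
  · subst h11; exact .trans (show _ = [a,b,c,d,e+1] from rfl) (by simp)
  by_cases h12 : w = "developpeur "
  · subst h12; exact .trans (show _ = [a,b,c,d,e+1] from rfl) (by simp)
  simp [PySem.Dict.getD, PySem.Dict.get?, h1, h2, h3, h4, h5, h6, h7, h8, h9, h10, h11, h12,
        Ne.symm h1, Ne.symm h2, Ne.symm h3, Ne.symm h4, Ne.symm h5, Ne.symm h6, Ne.symm h7,
        Ne.symm h8, Ne.symm h9, Ne.symm h10, Ne.symm h11, Ne.symm h12]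

-- B's counting pass computes exactly the five per-category counts
lemma pvFold (ws : List String) : ∀ (a b c d e : Int),
    ws.foldl (fun sc word =>
      (((PySem.Dict.mk [("data",[0,1,2]),("scientist",[0]),("analyst",[1]),("analyste",[1]),
                   ("données",[1,2]),("ingénieur",[2,3]),("engineer",[2,3]),("machine",[3]),
                   ("learning",[3]),("python",[4]),("developer",[4]),("developpeur ",[4])] :
        PySem.Dict String (List Int)).getD word []).foldl
          (fun sc (i : Int) => sc.modify i.toNat (· + 1)) sc)) [a,b,c,d,e] =
    [a + pvCnt ["data","scientist"] ws,
     b + pvCnt ["data","analyst","analyste","données"] ws,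
     c + pvCnt ["ingénieur","engineer","data","données"] ws,
     d + pvCnt ["machine","learning","engineer","ingénieur"] ws,
     e + pvCnt ["python","developer","developpeur "] ws] := by
  induction ws with
  | nil => intro a b c d e; simp [pvCnt]
  | cons w ws ih =>
    intro a b c d e
    simp only [List.foldl_cons]
    rw [pvStep, ih]
    simp only [pvCnt_cons, add_assoc]

lemma pvB_eval (t : String) :
    classifyJob_alt t =
      pvSelB [pvCnt ["data","scientist"] ((PySem.Str.split? t " ").getD []),
              pvCnt ["data","analyst","analyste","données"] ((PySem.Str.split? t " ").getD []),
              pvCnt ["ingénieur","engineer","data","données"] ((PySem.Str.split? t " ").getD []),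
              pvCnt ["machine","learning","engineer","ingénieur"] ((PySem.Str.split? t " ").getD []),
              pvCnt ["python","developer","developpeur "] ((PySem.Str.split? t " ").getD [])] := by
  have h : classifyJob_alt t = pvSelB (((PySem.Str.split? t " ").getD []).foldl (fun sc word =>
      (((PySem.Dict.mk [("data",[0,1,2]),("scientist",[0]),("analyst",[1]),("analyste",[1]),
                   ("données",[1,2]),("ingénieur",[2,3]),("engineer",[2,3]),("machine",[3]),
                   ("learning",[3]),("python",[4]),("developer",[4]),("developpeur ",[4])] :
        PySem.Dict String (List Int)).getD word []).foldl
          (fun sc (i : Int) => sc.modify i.toNat (· + 1)) sc)) [0,0,0,0,0]) := rfl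
  rw [h, pvFold]
  simp only [zero_add]

-- the two selection tails agree on every nonempty score list:
-- the first enumerate entry holding the maximum is both A's max_idx[0] and B's find?
lemma pvSel_eq (ns : List Int) (h : ns ≠ []) : pvSelA ns = pvSelB ns := by
  obtain ⟨m, hm⟩ : ∃ m, PySem.List.max? ns (fun x => x) = some m := by
    cases hh : PySem.List.max? ns (fun x => x) with
    | none => rw [PySem.List.max?_eq_none_iff] at hh; exact absurd hh h
    | some m => exact ⟨m, rfl⟩
  have hmem : m ∈ ns := PySem.List.max?_mem hm
  obtain ⟨q, hq, hq2⟩ : ∃ q ∈ PySem.List.enumerate ns 0, q.2 = m := by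
    rw [← PySem.List.map_snd_enumerate ns 0] at hmem
    obtain ⟨q, hq, hq2⟩ := List.mem_map.mp hmem
    exact ⟨q, hq, hq2⟩
  obtain ⟨p, hp⟩ : ∃ p, (PySem.List.enumerate ns).find? (fun p => p.2 == m) = some p := by
    have hs : ((PySem.List.enumerate ns).find? (fun p => p.2 == m)).isSome := by
      rw [List.find?_isSome]; exact ⟨q, hq, by simp [hq2]⟩
    exact Option.isSome_iff_exists.mp hs
  have hf : ((PySem.List.enumerate ns).filter (fun p => p.2 == m)).head? = some p := by
    rw [List.head?_filter, hp]
  obtain ⟨rest, hrest⟩ : ∃ rest, (PySem.List.enumerate ns).filter (fun p => p.2 == m) = p :: rest := by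
    cases hc : (PySem.List.enumerate ns).filter (fun p => p.2 == m) with
    | nil => rw [hc] at hf; simp at hf
    | cons x xs =>
      rw [hc] at hf
      simp only [List.head?_cons, Option.some.injEq] at hf
      exact ⟨xs, by rw [hf]⟩
  simp only [pvSelA, pvSelB, hm, Option.getD_some, hp, hrest, List.map_cons,
             PySem.List.pyGetD_zero_cons]

-- ===== VERDICT (by name: the statement is the Claim_ definition above) =====
theorem classifyJob_spec : Claim_equal_classifyJob := by
  intro t _
  show classifyJob t = classifyJob_alt t
  rw [pvA_eval t, pvB_eval t]
  rw [pvSel_eq _ (by simp)]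
  simp only [pvCnt_nil, sub_zero]
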